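-- pv_equiv track=rewrite | github.com/FlyingAlpaca0/Chess-Game | Piece.py | pathGen
-- ===== SOURCE A (Python) =====
-- def pathGen(target, pos, kill):
--     path = []
--     for i in [-1, 0, 1]:
--         for j in [-1, 0, 1]:
--             if  (0 <= pos[0] + i < 8 and
--                 0 <= pos[1] + j < 8 and
--                 (pos[0] + i, pos[1] + j) == target):
--                 path.append((pos[0] + i, pos[1] + j))
--     return path
-- ===== SOURCE B (Python) =====
-- def pathGen(target, pos, kill):
--     dx = target[0] - pos[0]
--     dy = target[1] - pos[1]
--     if dx in (-1, 0, 1) and dy in (-1, 0, 1) and 0 <= target[0] < 8 and 0 <= target[1] < 8: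
--         return [target]
--     return []
-- ===== Notes on version B (the rewrite author's own statement) =====
-- stated objective: simpler
-- what changed: Replaces the 3x3 neighbourhood scan with a closed-form O(1) adjacency test on the coordinate differences plus a board-bounds check on the target itself.
import Mathlib
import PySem

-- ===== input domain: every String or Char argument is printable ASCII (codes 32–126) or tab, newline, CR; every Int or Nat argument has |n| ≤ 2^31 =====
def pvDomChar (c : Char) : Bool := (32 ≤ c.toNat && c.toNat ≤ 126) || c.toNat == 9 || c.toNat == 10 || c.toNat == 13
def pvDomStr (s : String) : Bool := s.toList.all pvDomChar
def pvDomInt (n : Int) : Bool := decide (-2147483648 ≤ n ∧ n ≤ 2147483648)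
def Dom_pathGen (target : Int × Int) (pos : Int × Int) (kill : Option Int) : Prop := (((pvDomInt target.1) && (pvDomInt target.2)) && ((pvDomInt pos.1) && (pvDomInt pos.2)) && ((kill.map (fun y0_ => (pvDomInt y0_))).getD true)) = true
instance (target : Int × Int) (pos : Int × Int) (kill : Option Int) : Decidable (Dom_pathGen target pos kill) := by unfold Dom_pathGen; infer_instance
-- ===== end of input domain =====

-- B replaces A's 3x3 neighbourhood scan with a closed-form adjacency test (simpler).
-- ===== PORT A =====
-- inner 'for j in [-1,0,1]' loop, as structural recursion over the list of j's
def pathGenInner (target : Int × Int) (pos : Int × Int) (i : Int) :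
    List (Int × Int) → List Int → List (Int × Int)
  | path, [] => path
  | path, j :: js =>
    pathGenInner target pos i
      (if 0 ≤ pos.1 + i ∧ pos.1 + i < 8 ∧ 0 ≤ pos.2 + j ∧ pos.2 + j < 8 ∧
          (pos.1 + i, pos.2 + j) = target
       then path ++ [(pos.1 + i, pos.2 + j)] else path) js

-- outer 'for i in [-1,0,1]' loop
def pathGenOuter (target : Int × Int) (pos : Int × Int) :
    List (Int × Int) → List Int → List (Int × Int)
  | path, [] => path
  | path, i :: is => pathGenOuter target pos (pathGenInner target pos i path [-1, 0, 1]) is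

def pathGen (target : Int × Int) (pos : Int × Int) (kill : Option Int) : List (Int × Int) :=
  pathGenOuter target pos [] [-1, 0, 1]

-- ===== PORT B =====
def pathGen_alt (target : Int × Int) (pos : Int × Int) (kill : Option Int) : List (Int × Int) :=
  let dx := target.1 - pos.1
  let dy := target.2 - pos.2
  if (dx = -1 ∨ dx = 0 ∨ dx = 1) ∧ (dy = -1 ∨ dy = 0 ∨ dy = 1) ∧
     0 ≤ target.1 ∧ target.1 < 8 ∧ 0 ≤ target.2 ∧ target.2 < 8
  then [target] else []

-- ===== PRECONDITION & SPEC =====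
def Spec_pathGen (target : Int × Int) (pos : Int × Int) (kill : Option Int) (out : List (Int × Int)) : Prop := out = pathGen_alt target pos kill
instance (target : Int × Int) (pos : Int × Int) (kill : Option Int) (out : List (Int × Int)) : Decidable (Spec_pathGen target pos kill out) := by unfold Spec_pathGen; infer_instance

-- ===== CLAIM (what is proved, stated in full; the proofs are below) =====
def Claim_equal_pathGen : Prop := ∀ (target : Int × Int) (pos : Int × Int) (kill : Option Int), Dom_pathGen target pos kill → Spec_pathGen target pos kill (pathGen target pos kill)

-- ===== LEMMAS AND PROOFS =====

-- ===== VERDICT (by name: the statement is the Claim_ definition above) =====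
lemma pathGenInner_acc (target : Int × Int) (pos : Int × Int) (i : Int)
    (path : List (Int × Int)) (js : List Int) :
    pathGenInner target pos i path js = path ++ pathGenInner target pos i [] js := by
  induction js generalizing path with
  | nil => simp [pathGenInner]
  | cons j js ih =>
    simp only [pathGenInner]
    split_ifs with h
    · rw [ih, ih ([] ++ [(pos.1 + i, pos.2 + j)])]; simp
    · exact ih path

lemma pathGenInner_eval (t1 t2 p1 p2 i : Int) :
    pathGenInner (t1, t2) (p1, p2) i [] [-1, 0, 1] =
      if 0 ≤ p1 + i ∧ p1 + i < 8 ∧ 0 ≤ t2 ∧ t2 < 8 ∧ t1 = p1 + i ∧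
         (t2 = p2 - 1 ∨ t2 = p2 ∨ t2 = p2 + 1)
      then [(t1, t2)] else [] := by
  simp only [pathGenInner, List.nil_append, Prod.mk.injEq]
  split_ifs <;>
    first
    | rfl
    | omega
    | (simp only [List.cons.injEq, Prod.mk.injEq, List.nil_append, and_true]
       omega)

set_option maxHeartbeats 1000000 in
theorem pathGen_spec : Claim_equal_pathGen := by
  rintro ⟨t1, t2⟩ ⟨p1, p2⟩ kill _
  unfold Spec_pathGen pathGen pathGen_alt
  simp only [pathGenOuter]
  rw [pathGenInner_acc (path := pathGenInner _ _ _ (pathGenInner _ _ _ [] _) _),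
      pathGenInner_acc (path := pathGenInner _ _ _ [] _),
      pathGenInner_eval, pathGenInner_eval, pathGenInner_eval]
  split_ifs <;> first | rfl | omega
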